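-- pv_equiv track=rewrite | github.com/vpc20/advent-of-code-2025 | aoc_03_part2.py | get_max_digit
-- ===== SOURCE A (Python) =====
-- def get_max_digit(s, maxlen):
--     max_digit = 0
--     digit_idx = 0
--     for i, c in enumerate(s[:len(s) - maxlen + 1]):
--         if int(c) > max_digit:
--             max_digit = int(c)
--             digit_idx = i
--     return str(max_digit), digit_idx
-- ===== SOURCE B (Python) =====
-- def get_max_digit(s, maxlen):
--     # Bucket approach: record the first index of each digit value, then
--     # count down from 9 to find the highest nonzero digit present.
--     first = {}
--     for i, c in enumerate(s[:len(s) - maxlen + 1]):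
--         d = int(c)
--         if d not in first:
--             first[d] = i
--     for d in range(9, 0, -1):
--         if d in first:
--             return str(d), first[d]
--     return '0', 0
-- ===== Notes on version B (the rewrite author's own statement) =====
-- stated objective: alternative
-- what changed: Replaces A's running (max,index) tracking scan by a bucket algorithm: one pass records the first index of each digit value in a dict, then a countdown from 9 to 1 returns the highest nonzero digit present, falling back to digit zero at index zero when none is.
import Mathlib
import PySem

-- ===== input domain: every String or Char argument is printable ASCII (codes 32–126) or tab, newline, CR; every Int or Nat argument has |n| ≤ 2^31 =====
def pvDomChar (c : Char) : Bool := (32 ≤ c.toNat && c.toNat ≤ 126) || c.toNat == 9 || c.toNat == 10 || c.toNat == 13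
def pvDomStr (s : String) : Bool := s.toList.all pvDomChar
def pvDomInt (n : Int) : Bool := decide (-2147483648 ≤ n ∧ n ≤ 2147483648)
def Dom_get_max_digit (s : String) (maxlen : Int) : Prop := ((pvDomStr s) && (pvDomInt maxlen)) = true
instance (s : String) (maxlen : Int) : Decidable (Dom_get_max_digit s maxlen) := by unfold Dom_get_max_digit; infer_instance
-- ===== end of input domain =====

-- B replaces A's running (max,index) tracking scan by a bucket algorithm (first-index-per-digit dict, then a 9→1 countdown); objective: alternative.


-- int(c) for one character; the none case (ValueError) is excluded by Pre_, so the default is never claimed about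
def pvIntOfChar (c : Char) : Int := (PySem.Int.ofChars? [c]).getD 0

-- ===== PORT A =====
def get_max_digit (s : String) (maxlen : Int) : String × Int :=
  let r := (PySem.List.enumerate (PySem.List.slice s.toList none (some ((s.toList.length : Int) - maxlen + 1))) 0).foldl
      (fun (acc : Int × Int) p => if acc.1 < pvIntOfChar p.2 then (pvIntOfChar p.2, p.1) else acc) (0, 0)
  (PySem.Int.toStr r.1, r.2)

-- ===== PORT B =====
-- the countdown loop of Source B: first d in range(9, 0, -1) that is a key of `first`, else the ('0', 0) fallback
def pvScanB (ks : List Int) (first : PySem.Dict Int Int) : String × Int :=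
  match ks with
  | [] => ("0", 0)
  | k :: t =>
    match first.get? k with
    | some i => (PySem.Int.toStr k, i)
    | none => pvScanB t first

def get_max_digit_alt (s : String) (maxlen : Int) : String × Int :=
  let first := (PySem.List.enumerate (PySem.List.slice s.toList none (some ((s.toList.length : Int) - maxlen + 1))) 0).foldl
      (fun (d : PySem.Dict Int Int) p =>
        let v := pvIntOfChar p.2
        if d.contains v = false then d.insert v p.1 else d) PySem.Dict.empty
  pvScanB (PySem.List.pyRange 9 0 (-1)) first

-- ===== PRECONDITION & SPEC =====
-- Pre_ excludes exactly the inputs on which A raises ValueError: a non-digit character in the scanned prefix.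
def Pre_get_max_digit (s : String) (maxlen : Int) : Prop :=
  (PySem.List.slice s.toList none (some ((s.toList.length : Int) - maxlen + 1))).all PySem.Chars.isdigit = true
instance (s : String) (maxlen : Int) : Decidable (Pre_get_max_digit s maxlen) := by unfold Pre_get_max_digit; infer_instance
def pvWitness_get_max_digit : String × Int := ("123", 1)

def Spec_get_max_digit (s : String) (maxlen : Int) (out : String × Int) : Prop := out = get_max_digit_alt s maxlen
instance (s : String) (maxlen : Int) (out : String × Int) : Decidable (Spec_get_max_digit s maxlen out) := by unfold Spec_get_max_digit; infer_instance

-- ===== CLAIM (what is proved, stated in full; the proofs are below) =====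
def Claim_equal_get_max_digit : Prop := ∀ (s : String) (maxlen : Int), Dom_get_max_digit s maxlen → Pre_get_max_digit s maxlen → Spec_get_max_digit s maxlen (get_max_digit s maxlen)

-- ===== LEMMAS AND PROOFS =====

-- A's loop, written structurally on the list of digit values (proof helper)
def pvLoopA (ds : List Int) (i : Int) (acc : Int × Int) : Int × Int :=
  match ds with
  | [] => acc
  | d :: t => pvLoopA t (i + 1) (if acc.1 < d then (d, i) else acc)

theorem pv_foldl_enum_eq (cs : List Char) : ∀ (i : Int) (acc : Int × Int),
    (PySem.List.enumerate cs i).foldl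
      (fun (acc : Int × Int) p => if acc.1 < pvIntOfChar p.2 then (pvIntOfChar p.2, p.1) else acc) acc
    = pvLoopA (cs.map pvIntOfChar) i acc := by
  induction cs with
  | nil => intro i acc; simp [PySem.List.enumerate_nil, pvLoopA]
  | cons c cs ih => intro i acc; simp [PySem.List.enumerate_cons, pvLoopA, ih]

theorem pv_loopA_char (ds : List Int) : ∀ (i m0 j0 : Int),
    pvLoopA ds i (m0, j0) =
      if ds.foldl max m0 = m0 then (m0, j0)
      else (ds.foldl max m0, i + (((PySem.List.index? ds (ds.foldl max m0)).getD 0 : Nat) : Int)) := by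
  induction ds with
  | nil => intro i m0 j0; simp [pvLoopA]
  | cons d t ih =>
    intro i m0 j0
    have hstep : ∀ acc : Int × Int, pvLoopA (d :: t) i acc
        = pvLoopA t (i + 1) (if acc.1 < d then (d, i) else acc) := fun _ => rfl
    by_cases hd : m0 < d
    · rw [hstep, if_pos hd, ih]
      have hfold : (d :: t).foldl max m0 = t.foldl max d := by
        simp [List.foldl, max_eq_right (le_of_lt hd)]
      rw [hfold]
      by_cases hT : t.foldl max d = d
      · rw [if_pos hT, hT]
        have hne : ¬ (d = m0) := by omega
        rw [if_neg hne, PySem.List.index?_cons_self]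
        simp
      · have hTmem : t.foldl max d ∈ t := (PySem.List.foldl_max_mem t d).resolve_left hT
        have hdT : d < t.foldl max d := lt_of_le_of_ne (PySem.List.le_foldl_max t d).1 (Ne.symm hT)
        have hsome : (PySem.List.index? t (t.foldl max d)).isSome := by
          rw [PySem.List.index?_isSome_iff]; exact hTmem
        obtain ⟨k, hk⟩ := Option.isSome_iff_exists.mp hsome
        have hMne : ¬ (t.foldl max d = m0) := by omega
        have hne : d ≠ t.foldl max d := by omega
        rw [if_neg hT, if_neg hMne, PySem.List.index?_cons_of_ne t hne, hk]
        simp only [Option.map_some, Option.getD_some, Prod.mk.injEq, true_and]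
        omega
    · have hd' : d ≤ m0 := not_lt.mp hd
      rw [hstep, if_neg hd, ih]
      have hfold : (d :: t).foldl max m0 = t.foldl max m0 := by
        simp [List.foldl, max_eq_left hd']
      rw [hfold]
      by_cases hM : t.foldl max m0 = m0
      · rw [if_pos hM, if_pos hM]
      · have hMmem : t.foldl max m0 ∈ t := (PySem.List.foldl_max_mem t m0).resolve_left hM
        have hm0M : m0 < t.foldl max m0 := lt_of_le_of_ne (PySem.List.le_foldl_max t m0).1 (Ne.symm hM)
        have hsome : (PySem.List.index? t (t.foldl max m0)).isSome := by
          rw [PySem.List.index?_isSome_iff]; exact hMmem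
        obtain ⟨k, hk⟩ := Option.isSome_iff_exists.mp hsome
        have hne : d ≠ t.foldl max m0 := by omega
        rw [if_neg hM, if_neg hM, PySem.List.index?_cons_of_ne t hne, hk]
        simp only [Option.map_some, Option.getD_some, Prod.mk.injEq, true_and]
        omega

theorem pv_digit_nonneg (c : Char) (h : PySem.Chars.isdigit c = true) : 0 ≤ pvIntOfChar c := by
  have key : ∀ n : Fin 58, 0 ≤ pvIntOfChar (Char.ofNat (n : Nat)) := by decide
  have h' : c ≤ '9' := by
    simp [PySem.Chars.isdigit] at h; exact h.2
  have hlt : c.toNat < 58 := by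
    rw [Char.le_def] at h'
    have h2 := UInt32.le_iff_toNat_le.mp h'
    have h3 : ('9').val.toNat = 57 := by decide
    show c.val.toNat < 58
    omega
  have := key ⟨c.toNat, hlt⟩
  simpa [Char.ofNat_toNat] using this

-- the dict built by B's first loop is exactly the first-occurrence index map of the digit list
theorem pv_build_get (cs : List Char) : ∀ (i : Int) (d0 : PySem.Dict Int Int) (k : Int),
    ((PySem.List.enumerate cs i).foldl
      (fun (d : PySem.Dict Int Int) p =>
        let v := pvIntOfChar p.2
        if d.contains v = false then d.insert v p.1 else d) d0).get? k
    = match d0.get? k with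
      | some w => some w
      | none => (PySem.List.index? (cs.map pvIntOfChar) k).map (fun n : Nat => i + n) := by
  induction cs with
  | nil => intro i d0 k; cases h : d0.get? k <;> simp [PySem.List.enumerate_nil, h]
  | cons c t ih =>
    intro i d0 k
    rw [PySem.List.enumerate_cons]
    simp only [List.foldl_cons]
    by_cases hc : d0.contains (pvIntOfChar c) = false
    · simp only [hc, if_pos]
      rw [ih]
      rw [PySem.Dict.get?_insert]
      by_cases hk : k = pvIntOfChar c
      · have h0 : d0.get? k = none := by
          rw [hk, PySem.Dict.get?_eq_none_iff_contains]; exact hc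
        rw [if_pos hk, h0, hk, List.map_cons, PySem.List.index?_cons_self]
        simp
      · rw [if_neg hk]
        cases h0 : d0.get? k with
        | some w => rfl
        | none =>
          rw [List.map_cons, PySem.List.index?_cons_of_ne _ (fun h => hk h.symm)]
          cases hix : PySem.List.index? (t.map pvIntOfChar) k
          · simp
          · simp
            omega
    · have hct : d0.contains (pvIntOfChar c) = true := by simpa using hc
      simp only [hct, Bool.true_eq_false, if_false]
      rw [ih]
      by_cases hk : k = pvIntOfChar c
      · have hsome : (d0.get? k).isSome := by
          rw [hk, ← PySem.Dict.contains_eq_isSome_get?]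
          exact hct
        obtain ⟨w, hw⟩ := Option.isSome_iff_exists.mp hsome
        rw [hw]
      · cases h0 : d0.get? k with
        | some w => rfl
        | none =>
          rw [List.map_cons, PySem.List.index?_cons_of_ne _ (fun h => hk h.symm)]
          cases hix : PySem.List.index? (t.map pvIntOfChar) k
          · simp
          · simp
            omega

-- the countdown hits the highest key present
theorem pv_scan_hit (first : PySem.Dict Int Int) (M j : Int) :
    ∀ ks : List Int, List.Pairwise (· > ·) ks → M ∈ ks → first.get? M = some j →
      (∀ k, M < k → first.get? k = none) → pvScanB ks first = (PySem.Int.toStr M, j) := by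
  intro ks
  induction ks with
  | nil => intro _ h; exact absurd h (List.not_mem_nil)
  | cons k t ih =>
    intro hp hm hM habove
    rcases List.mem_cons.mp hm with rfl | hmt
    · simp [pvScanB, hM]
    · have hkM : M < k := (List.pairwise_cons.mp hp).1 M hmt
      have hk : first.get? k = none := habove k hkM
      simp only [pvScanB, hk]
      exact ih (List.pairwise_cons.mp hp).2 hmt hM habove

theorem pv_scan_miss (first : PySem.Dict Int Int) :
    ∀ ks : List Int, (∀ k ∈ ks, first.get? k = none) → pvScanB ks first = ("0", 0) := by
  intro ks
  induction ks with
  | nil => intro _; rfl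
  | cons k t ih =>
    intro h
    simp only [pvScanB, h k (List.mem_cons_self ..)]
    exact ih (fun k' hk' => h k' (List.mem_cons_of_mem _ hk'))

theorem pv_range91 : PySem.List.pyRange 9 0 (-1) = [9, 8, 7, 6, 5, 4, 3, 2, 1] := by decide

theorem pv_digit_le9 (c : Char) (h : PySem.Chars.isdigit c = true) : pvIntOfChar c ≤ 9 := by
  have key : ∀ n : Fin 58, pvIntOfChar (Char.ofNat (n : Nat)) ≤ 9 := by decide
  have h' : c ≤ '9' := by
    simp [PySem.Chars.isdigit] at h; exact h.2
  have hlt : c.toNat < 58 := by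
    rw [Char.le_def] at h'
    have h2 := UInt32.le_iff_toNat_le.mp h'
    have h3 : ('9').val.toNat = 57 := by decide
    show c.val.toNat < 58
    omega
  have := key ⟨c.toNat, hlt⟩
  simpa [Char.ofNat_toNat] using this

-- the core equivalence, on the raw character list of the scanned prefix
theorem pv_core (cs : List Char) (hall : ∀ c ∈ cs, PySem.Chars.isdigit c = true) :
    (PySem.Int.toStr ((PySem.List.enumerate cs 0).foldl
        (fun (acc : Int × Int) p => if acc.1 < pvIntOfChar p.2 then (pvIntOfChar p.2, p.1) else acc) (0, 0)).1,
     ((PySem.List.enumerate cs 0).foldl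
        (fun (acc : Int × Int) p => if acc.1 < pvIntOfChar p.2 then (pvIntOfChar p.2, p.1) else acc) (0, 0)).2)
    = pvScanB (PySem.List.pyRange 9 0 (-1))
        ((PySem.List.enumerate cs 0).foldl
          (fun (d : PySem.Dict Int Int) p =>
            let v := pvIntOfChar p.2
            if d.contains v = false then d.insert v p.1 else d) PySem.Dict.empty) := by
  have hnn : ∀ v ∈ cs.map pvIntOfChar, 0 ≤ v ∧ v ≤ 9 := by
    intro v hv
    obtain ⟨c, hc, rfl⟩ := List.mem_map.mp hv
    exact ⟨pv_digit_nonneg c (hall c hc), pv_digit_le9 c (hall c hc)⟩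
  have hget : ∀ k : Int,
      ((PySem.List.enumerate cs 0).foldl
        (fun (d : PySem.Dict Int Int) p =>
          let v := pvIntOfChar p.2
          if d.contains v = false then d.insert v p.1 else d) PySem.Dict.empty).get? k
      = (PySem.List.index? (cs.map pvIntOfChar) k).map (fun n : Nat => (n : Int)) := by
    intro k
    rw [pv_build_get cs 0 PySem.Dict.empty k, PySem.Dict.get?_empty]
    simp
  have hub : ∀ v ∈ cs.map pvIntOfChar, v ≤ (cs.map pvIntOfChar).foldl max 0 :=
    (PySem.List.le_foldl_max (cs.map pvIntOfChar) 0).2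
  have hM0 : 0 ≤ (cs.map pvIntOfChar).foldl max 0 := (PySem.List.le_foldl_max (cs.map pvIntOfChar) 0).1
  have habove : ∀ k, (cs.map pvIntOfChar).foldl max 0 < k →
      ((PySem.List.enumerate cs 0).foldl
        (fun (d : PySem.Dict Int Int) p =>
          let v := pvIntOfChar p.2
          if d.contains v = false then d.insert v p.1 else d) PySem.Dict.empty).get? k = none := by
    intro k hk
    rw [hget]
    have hnm : k ∉ cs.map pvIntOfChar := fun hmem => absurd (hub k hmem) (by omega)
    rw [(PySem.List.index?_eq_none_iff _ _).mpr hnm]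
    rfl
  rw [pv_foldl_enum_eq, pv_loopA_char, pv_range91]
  by_cases hz : (cs.map pvIntOfChar).foldl max 0 = 0
  · rw [if_pos hz]
    have hmiss : ∀ k ∈ ([9, 8, 7, 6, 5, 4, 3, 2, 1] : List Int),
        ((PySem.List.enumerate cs 0).foldl
          (fun (d : PySem.Dict Int Int) p =>
            let v := pvIntOfChar p.2
            if d.contains v = false then d.insert v p.1 else d) PySem.Dict.empty).get? k = none := by
      intro k hk
      apply habove
      fin_cases hk <;> omega
    rw [pv_scan_miss _ _ hmiss]
    decide
  · rw [if_neg hz]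
    have hmem : (cs.map pvIntOfChar).foldl max 0 ∈ cs.map pvIntOfChar :=
      (PySem.List.foldl_max_mem (cs.map pvIntOfChar) 0).resolve_left hz
    have hM9 : (cs.map pvIntOfChar).foldl max 0 ≤ 9 := (hnn _ hmem).2
    have hsome : (PySem.List.index? (cs.map pvIntOfChar) ((cs.map pvIntOfChar).foldl max 0)).isSome :=
      (PySem.List.index?_isSome_iff _ _).mpr hmem
    obtain ⟨n, hn⟩ := Option.isSome_iff_exists.mp hsome
    have hMget : ((PySem.List.enumerate cs 0).foldl
          (fun (d : PySem.Dict Int Int) p =>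
            let v := pvIntOfChar p.2
            if d.contains v = false then d.insert v p.1 else d) PySem.Dict.empty).get?
        ((cs.map pvIntOfChar).foldl max 0) = some (n : Int) := by
      rw [hget, hn]; rfl
    rw [pv_scan_hit _ _ (n : Int) _ (by decide) (by simp; omega) hMget habove, hn]
    simp

theorem get_max_digit_spec : Claim_equal_get_max_digit := by
  intro s maxlen _hdom hpre
  unfold Spec_get_max_digit get_max_digit get_max_digit_alt
  unfold Pre_get_max_digit at hpre
  have hall : ∀ c ∈ PySem.List.slice s.toList none (some ((s.toList.length : Int) - maxlen + 1)),
      PySem.Chars.isdigit c = true := by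
    simpa [List.all_eq_true] using hpre
  exact pv_core _ hall
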